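-- pv_equiv track=rewrite | github.com/Ezrastrading/Ezras-trading-ai | trading-ai/src/trading_ai/shark/coinbase_spot/gate_b_truth.py | classify_rejection_kind
-- ===== SOURCE A (Python) =====
-- from typing import Any, Dict, List, Mapping, Optional, Sequence
--
-- MISSING_MARKET_DATA = "missing_market_data"
--
-- STALE_MARKET_DATA = "stale_market_data"
--
-- SPREAD_TOO_WIDE_MEASURED = "spread_too_wide_measured"
--
-- LIQUIDITY_TOO_THIN = "liquidity_too_thin"
--
-- MOMENTUM_TOO_WEAK = "momentum_too_weak"
--
-- EXCLUDED_BY_POLICY = "excluded_by_policy"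
--
-- EXCLUDED_BY_COOLDOWN = "excluded_by_cooldown"
--
-- CAPITAL_NOT_AVAILABLE = "capital_not_available"
--
-- DUPLICATE_OR_LOCKED_SYMBOL = "duplicate_or_locked_symbol"
--
-- STRUCTURAL_CANDIDATE_ERROR = "structural_candidate_error"
--
-- def classify_rejection_kind(failure_codes: Sequence[str]) -> str:
--     if not failure_codes:
--         return "none"
--     if STRUCTURAL_CANDIDATE_ERROR in failure_codes:
--         return "data_quality"
--     if CAPITAL_NOT_AVAILABLE in failure_codes:
--         return "capital_gate"
--     if any(x in (MISSING_MARKET_DATA, STALE_MARKET_DATA) for x in failure_codes):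
--         return "data_quality"
--     if any(
--         x
--         in (
--             SPREAD_TOO_WIDE_MEASURED,
--             LIQUIDITY_TOO_THIN,
--             MOMENTUM_TOO_WEAK,
--             EXCLUDED_BY_POLICY,
--             EXCLUDED_BY_COOLDOWN,
--             DUPLICATE_OR_LOCKED_SYMBOL,
--         )
--         for x in failure_codes
--     ):
--         return "market_policy"
--     return "data_quality"
-- ===== SOURCE B (Python) =====
-- # Single-pass priority-table classifier: one dict lookup per code, keep the
-- # highest-priority (smallest number) entry seen; same results as the chain of
-- # membership scans in A.
-- _PRIORITY = {
--     "structural_candidate_error": (0, "data_quality"),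
--     "capital_not_available": (1, "capital_gate"),
--     "missing_market_data": (2, "data_quality"),
--     "stale_market_data": (2, "data_quality"),
--     "spread_too_wide_measured": (3, "market_policy"),
--     "liquidity_too_thin": (3, "market_policy"),
--     "momentum_too_weak": (3, "market_policy"),
--     "excluded_by_policy": (3, "market_policy"),
--     "excluded_by_cooldown": (3, "market_policy"),
--     "duplicate_or_locked_symbol": (3, "market_policy"),
-- }
--
-- def classify_rejection_kind(failure_codes):
--     if not failure_codes:
--         return "none"
--     best = (4, "data_quality")
--     for code in failure_codes:
--         p = _PRIORITY.get(code, (4, "data_quality"))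
--         if p[0] < best[0]:
--             best = p
--     return best[1]
-- ===== Notes on version B (the rewrite author's own statement) =====
-- stated objective: simpler
-- what changed: Replaces A's chain of four membership scans over the list with a priority table (code -> (priority, category)) and a single pass keeping the smallest-priority entry.
import Mathlib
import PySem

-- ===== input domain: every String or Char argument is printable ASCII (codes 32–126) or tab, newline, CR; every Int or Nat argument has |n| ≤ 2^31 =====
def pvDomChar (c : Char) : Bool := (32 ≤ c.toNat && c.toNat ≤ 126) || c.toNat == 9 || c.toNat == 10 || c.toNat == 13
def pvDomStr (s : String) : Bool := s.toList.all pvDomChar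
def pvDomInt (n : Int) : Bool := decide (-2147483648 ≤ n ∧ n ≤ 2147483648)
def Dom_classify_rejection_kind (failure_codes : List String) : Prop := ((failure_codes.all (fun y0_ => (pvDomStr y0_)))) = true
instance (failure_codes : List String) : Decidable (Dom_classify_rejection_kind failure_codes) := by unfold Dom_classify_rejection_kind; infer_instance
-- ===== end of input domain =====

-- B replaces A's chain of four membership scans with a priority table and one pass keeping the smallest-priority entry (simpler, single pass).

-- ===== PORT A =====
def classify_rejection_kind (failure_codes : List String) : String :=
  if failure_codes = [] then "none"
  else if failure_codes.contains "structural_candidate_error" then "data_quality"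
  else if failure_codes.contains "capital_not_available" then "capital_gate"
  else if failure_codes.any (fun x => x == "missing_market_data" || x == "stale_market_data") then "data_quality"
  else if failure_codes.any (fun x =>
      x == "spread_too_wide_measured" || x == "liquidity_too_thin" || x == "momentum_too_weak" ||
      x == "excluded_by_policy" || x == "excluded_by_cooldown" || x == "duplicate_or_locked_symbol") then "market_policy"
  else "data_quality"

-- ===== PORT B =====
def pvPriorityTable : PySem.Dict String (Int × String) :=
  PySem.Dict.ofList [
    ("structural_candidate_error", (0, "data_quality")),
    ("capital_not_available", (1, "capital_gate")),
    ("missing_market_data", (2, "data_quality")),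
    ("stale_market_data", (2, "data_quality")),
    ("spread_too_wide_measured", (3, "market_policy")),
    ("liquidity_too_thin", (3, "market_policy")),
    ("momentum_too_weak", (3, "market_policy")),
    ("excluded_by_policy", (3, "market_policy")),
    ("excluded_by_cooldown", (3, "market_policy")),
    ("duplicate_or_locked_symbol", (3, "market_policy"))]

def classify_rejection_kind_alt (failure_codes : List String) : String :=
  if failure_codes = [] then "none"
  else
    (failure_codes.foldl (fun best code =>
        let p := PySem.Dict.getD pvPriorityTable code ((4 : Int), "data_quality")
        if p.1 < best.1 then p else best)
      ((4 : Int), "data_quality")).2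

-- ===== PRECONDITION & SPEC =====
def Spec_classify_rejection_kind (failure_codes : List String) (out : String) : Prop := out = classify_rejection_kind_alt failure_codes
instance (failure_codes : List String) (out : String) : Decidable (Spec_classify_rejection_kind failure_codes out) := by unfold Spec_classify_rejection_kind; infer_instance

-- ===== CLAIM (what is proved, stated in full; the proofs are below) =====
def Claim_equal_classify_rejection_kind : Prop := ∀ (failure_codes : List String), Dom_classify_rejection_kind failure_codes → Spec_classify_rejection_kind failure_codes (classify_rejection_kind failure_codes)

-- ===== LEMMAS AND PROOFS =====

-- (priority, category) entry B looks up for one code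
def prioE (x : String) : Int × String :=
  PySem.Dict.getD pvPriorityTable x ((4 : Int), "data_quality")

def catOf (n : Int) : String :=
  if n = 0 then "data_quality" else if n = 1 then "capital_gate"
  else if n = 2 then "data_quality" else if n = 3 then "market_policy" else "data_quality"

lemma prioE_eq (x : String) : prioE x =
    if x = "structural_candidate_error" then ((0 : Int), "data_quality")
    else if x = "capital_not_available" then (1, "capital_gate")
    else if x = "missing_market_data" then (2, "data_quality")
    else if x = "stale_market_data" then (2, "data_quality")
    else if x = "spread_too_wide_measured" then (3, "market_policy")
    else if x = "liquidity_too_thin" then (3, "market_policy")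
    else if x = "momentum_too_weak" then (3, "market_policy")
    else if x = "excluded_by_policy" then (3, "market_policy")
    else if x = "excluded_by_cooldown" then (3, "market_policy")
    else if x = "duplicate_or_locked_symbol" then (3, "market_policy")
    else (4, "data_quality") := by
  have htab : pvPriorityTable = PySem.Dict.mk [
    ("structural_candidate_error", ((0 : Int), "data_quality")),
    ("capital_not_available", (1, "capital_gate")),
    ("missing_market_data", (2, "data_quality")),
    ("stale_market_data", (2, "data_quality")),
    ("spread_too_wide_measured", (3, "market_policy")),
    ("liquidity_too_thin", (3, "market_policy")),
    ("momentum_too_weak", (3, "market_policy")),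
    ("excluded_by_policy", (3, "market_policy")),
    ("excluded_by_cooldown", (3, "market_policy")),
    ("duplicate_or_locked_symbol", (3, "market_policy"))] := by decide
  by_cases h1 : x = "structural_candidate_error"
  · subst h1; decide
  by_cases h2 : x = "capital_not_available"
  · subst h2; simp [h1]; decide
  by_cases h3 : x = "missing_market_data"
  · subst h3; simp [h1, h2]; decide
  by_cases h4 : x = "stale_market_data"
  · subst h4; simp [h1, h2, h3]; decide
  by_cases h5 : x = "spread_too_wide_measured"
  · subst h5; simp [h1, h2, h3, h4]; decide
  by_cases h6 : x = "liquidity_too_thin"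
  · subst h6; simp [h1, h2, h3, h4, h5]; decide
  by_cases h7 : x = "momentum_too_weak"
  · subst h7; simp [h1, h2, h3, h4, h5, h6]; decide
  by_cases h8 : x = "excluded_by_policy"
  · subst h8; simp [h1, h2, h3, h4, h5, h6, h7]; decide
  by_cases h9 : x = "excluded_by_cooldown"
  · subst h9; simp [h1, h2, h3, h4, h5, h6, h7, h8]; decide
  by_cases h10 : x = "duplicate_or_locked_symbol"
  · subst h10; simp [h1, h2, h3, h4, h5, h6, h7, h8, h9]; decide
  rw [if_neg h1, if_neg h2, if_neg h3, if_neg h4, if_neg h5, if_neg h6, if_neg h7,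
    if_neg h8, if_neg h9, if_neg h10, prioE, htab]
  simp [PySem.Dict.getD_eq_get?_getD, PySem.Dict.get?,
    Ne.symm h1, Ne.symm h2, Ne.symm h3, Ne.symm h4, Ne.symm h5, Ne.symm h6,
    Ne.symm h7, Ne.symm h8, Ne.symm h9, Ne.symm h10]

lemma prioE_snd (x : String) : (prioE x).2 = catOf (prioE x).1 := by
  rw [prioE_eq]; split_ifs <;> simp [catOf]

lemma prioE_bounds (x : String) : 0 ≤ (prioE x).1 ∧ (prioE x).1 ≤ 4 := by
  rw [prioE_eq]; split_ifs <;> norm_num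

-- A's `any` tests as plain disjunctions of memberships
lemma anyTwo (xs : List String) :
    (xs.any fun x => x == "missing_market_data" || x == "stale_market_data") = true ↔
      "missing_market_data" ∈ xs ∨ "stale_market_data" ∈ xs := by
  simp only [List.any_eq_true, Bool.or_eq_true, beq_iff_eq]
  constructor
  · rintro ⟨x, hx, rfl | rfl⟩
    · exact Or.inl hx
    · exact Or.inr hx
  · rintro (h | h)
    · exact ⟨_, h, Or.inl rfl⟩
    · exact ⟨_, h, Or.inr rfl⟩

lemma anySix (xs : List String) :
    (xs.any fun x =>
      x == "spread_too_wide_measured" || x == "liquidity_too_thin" || x == "momentum_too_weak" ||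
      x == "excluded_by_policy" || x == "excluded_by_cooldown" || x == "duplicate_or_locked_symbol") = true ↔
      "spread_too_wide_measured" ∈ xs ∨ "liquidity_too_thin" ∈ xs ∨ "momentum_too_weak" ∈ xs ∨
      "excluded_by_policy" ∈ xs ∨ "excluded_by_cooldown" ∈ xs ∨ "duplicate_or_locked_symbol" ∈ xs := by
  simp only [List.any_eq_true, Bool.or_eq_true, beq_iff_eq]
  constructor
  · rintro ⟨x, hx, ((((rfl | rfl) | rfl) | rfl) | rfl) | rfl⟩ <;> tauto
  · rintro (h | h | h | h | h | h) <;> exact ⟨_, h, by tauto⟩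

-- B's fold with the minimum-priority fold on the first component
def minF (a : Int) (xs : List String) : Int :=
  xs.foldl (fun a c => if (prioE c).1 < a then (prioE c).1 else a) a

lemma foldl_pair (xs : List String) (b : Int × String) (hb : b.2 = catOf b.1) :
    xs.foldl (fun best code =>
        let p := PySem.Dict.getD pvPriorityTable code ((4 : Int), "data_quality")
        if p.1 < best.1 then p else best) b
      = (minF b.1 xs, catOf (minF b.1 xs)) := by
  induction xs generalizing b with
  | nil => simp [minF, ← hb]
  | cons c cs ih =>
    simp only [List.foldl_cons, minF, List.foldl_cons]
    rw [show (PySem.Dict.getD pvPriorityTable c ((4 : Int), "data_quality")) = prioE c from rfl]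
    by_cases h : (prioE c).1 < b.1
    · simp only [if_pos h]
      exact ih (prioE c) (prioE_snd c)
    · simp only [if_neg h]
      exact ih b hb

lemma minF_le_init (a : Int) (xs : List String) : minF a xs ≤ a := by
  induction xs generalizing a with
  | nil => simp [minF]
  | cons c cs ih =>
    simp only [minF, List.foldl_cons] at *
    split_ifs with h
    · exact le_trans (ih _) (le_of_lt h)
    · exact ih a

lemma minF_le_mem (a : Int) (xs : List String) (x : String) (hx : x ∈ xs) :
    minF a xs ≤ (prioE x).1 := by
  induction xs generalizing a with
  | nil => cases hx
  | cons c cs ih =>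
    rcases List.mem_cons.1 hx with rfl | hx'
    · simp only [minF, List.foldl_cons]
      split_ifs with h
      · exact minF_le_init _ _
      · exact le_trans (minF_le_init _ _) (not_lt.1 h)
    · simp only [minF, List.foldl_cons]
      split_ifs <;> exact ih _ hx'

lemma minF_cases (a : Int) (xs : List String) :
    minF a xs = a ∨ ∃ x ∈ xs, minF a xs = (prioE x).1 := by
  induction xs generalizing a with
  | nil => left; simp [minF]
  | cons c cs ih =>
    simp only [minF, List.foldl_cons]
    split_ifs with h
    · rcases ih (prioE c).1 with h1 | ⟨x, hx, hx2⟩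
      · exact Or.inr ⟨c, List.mem_cons_self .., h1⟩
      · exact Or.inr ⟨x, List.mem_cons_of_mem _ hx, hx2⟩
    · rcases ih a with h1 | ⟨x, hx, hx2⟩
      · exact Or.inl h1
      · exact Or.inr ⟨x, List.mem_cons_of_mem _ hx, hx2⟩

-- ===== VERDICT (by name: the statement is the Claim_ definition above) =====
theorem classify_rejection_kind_spec : Claim_equal_classify_rejection_kind := by
  intro xs _
  show classify_rejection_kind xs = classify_rejection_kind_alt xs
  by_cases hnil : xs = []
  · simp [classify_rejection_kind, classify_rejection_kind_alt, hnil]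
  · unfold classify_rejection_kind classify_rejection_kind_alt
    rw [if_neg hnil, if_neg hnil, foldl_pair xs ((4 : Int), "data_quality") rfl]
    by_cases h1 : "structural_candidate_error" ∈ xs
    · rw [if_pos (by simpa using h1)]
      have hle : minF 4 xs ≤ 0 := by
        have := minF_le_mem 4 xs _ h1; rwa [prioE_eq] at this
      have hge : 0 ≤ minF 4 xs := by
        rcases minF_cases 4 xs with h | ⟨x, _, hx⟩
        · omega
        · rw [hx]; exact (prioE_bounds x).1
      have hm : minF 4 xs = 0 := le_antisymm hle hge
      simp [hm, catOf]
    · rw [if_neg (by simpa using h1)]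
      have hlb1 : ∀ x ∈ xs, 1 ≤ (prioE x).1 := by
        intro x hx
        rw [prioE_eq, if_neg (fun (h : x = "structural_candidate_error") => h1 (h ▸ hx))]
        split_ifs <;> norm_num
      by_cases h2 : "capital_not_available" ∈ xs
      · rw [if_pos (by simpa using h2)]
        have hle : minF 4 xs ≤ 1 := by
          have := minF_le_mem 4 xs _ h2
          rw [prioE_eq] at this
          simpa using this
        have hge : 1 ≤ minF 4 xs := by
          rcases minF_cases 4 xs with h | ⟨x, hx, hxx⟩
          · omega
          · rw [hxx]; exact hlb1 x hx
        have hm : minF 4 xs = 1 := le_antisymm hle hge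
        simp [hm, catOf]
      · rw [if_neg (by simpa using h2)]
        by_cases h3 : "missing_market_data" ∈ xs ∨ "stale_market_data" ∈ xs
        · rw [if_pos ((anyTwo xs).2 h3)]
          have hlb2 : ∀ x ∈ xs, 2 ≤ (prioE x).1 := by
            intro x hx
            rw [prioE_eq, if_neg (fun (h : x = "structural_candidate_error") => h1 (h ▸ hx)), if_neg (fun (h : x = "capital_not_available") => h2 (h ▸ hx))]
            split_ifs <;> norm_num
          have hle : minF 4 xs ≤ 2 := by
            rcases h3 with h | h <;>
              · have := minF_le_mem 4 xs _ h; rw [prioE_eq] at this; simpa using this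
          have hge : 2 ≤ minF 4 xs := by
            rcases minF_cases 4 xs with h | ⟨x, hx, hxx⟩
            · omega
            · rw [hxx]; exact hlb2 x hx
          have hm : minF 4 xs = 2 := le_antisymm hle hge
          simp [hm, catOf]
        · rw [if_neg (fun hc => h3 ((anyTwo xs).1 hc))]
          push Not at h3
          by_cases h4 : "spread_too_wide_measured" ∈ xs ∨ "liquidity_too_thin" ∈ xs ∨
              "momentum_too_weak" ∈ xs ∨ "excluded_by_policy" ∈ xs ∨
              "excluded_by_cooldown" ∈ xs ∨ "duplicate_or_locked_symbol" ∈ xs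
          · rw [if_pos ((anySix xs).2 h4)]
            have hlb3 : ∀ x ∈ xs, 3 ≤ (prioE x).1 := by
              intro x hx
              rw [prioE_eq, if_neg (fun (h : x = "structural_candidate_error") => h1 (h ▸ hx)), if_neg (fun (h : x = "capital_not_available") => h2 (h ▸ hx)),
                if_neg (fun (h : x = "missing_market_data") => h3.1 (h ▸ hx)), if_neg (fun (h : x = "stale_market_data") => h3.2 (h ▸ hx))]
              split_ifs <;> norm_num
            have hle : minF 4 xs ≤ 3 := by
              rcases h4 with h | h | h | h | h | h <;>
                · have := minF_le_mem 4 xs _ h; rw [prioE_eq] at this; simpa using this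
            have hge : 3 ≤ minF 4 xs := by
              rcases minF_cases 4 xs with h | ⟨x, hx, hxx⟩
              · omega
              · rw [hxx]; exact hlb3 x hx
            have hm : minF 4 xs = 3 := le_antisymm hle hge
            simp [hm, catOf]
          · rw [if_neg (fun hc => h4 ((anySix xs).1 hc))]
            push Not at h4
            have hall : ∀ x ∈ xs, (prioE x).1 = 4 := by
              intro x hx
              rw [prioE_eq, if_neg (fun (h : x = "structural_candidate_error") => h1 (h ▸ hx)), if_neg (fun (h : x = "capital_not_available") => h2 (h ▸ hx)),
                if_neg (fun (h : x = "missing_market_data") => h3.1 (h ▸ hx)), if_neg (fun (h : x = "stale_market_data") => h3.2 (h ▸ hx)),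
                if_neg (fun (h : x = "spread_too_wide_measured") => h4.1 (h ▸ hx)), if_neg (fun (h : x = "liquidity_too_thin") => h4.2.1 (h ▸ hx)),
                if_neg (fun (h : x = "momentum_too_weak") => h4.2.2.1 (h ▸ hx)), if_neg (fun (h : x = "excluded_by_policy") => h4.2.2.2.1 (h ▸ hx)),
                if_neg (fun (h : x = "excluded_by_cooldown") => h4.2.2.2.2.1 (h ▸ hx)), if_neg (fun (h : x = "duplicate_or_locked_symbol") => h4.2.2.2.2.2 (h ▸ hx))]
            have hm : minF 4 xs = 4 := by
              rcases minF_cases 4 xs with h | ⟨x, hx, hxx⟩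
              · exact h
              · rw [hxx]; exact hall x hx
            simp [hm, catOf]
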